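-- pv_equiv track=rewrite | github.com/Harsh-eth/memeos | backend/services/generation_pipeline.py | emphasize_words
-- ===== SOURCE A (Python) =====
-- def emphasize_words(text: str) -> str:
--     words = text.split()
--
--     if len(words) <= 3:
--         return text.upper()
--
--     # emphasize last impactful words
--     for i in range(len(words) - 1, -1, -1):
--         if len(words[i]) > 4:
--             words[i] = words[i].upper()
--             break
--
--     return " ".join(words)
-- ===== SOURCE B (Python) =====
-- def emphasize_words(text: str) -> str:
--     words = text.split()
--
--     if len(words) <= 3:
--         return text.upper()
--
--     # single forward pass: remember the last impactful word's index
--     last = -1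
--     for i, w in enumerate(words):
--         if len(w) > 4:
--             last = i
--     if last >= 0:
--         words[last] = words[last].upper()
--
--     return " ".join(words)
-- ===== Notes on version B (the rewrite author's own statement) =====
-- stated objective: alternative
-- what changed: Replaces A's backward index loop with early break by a single forward enumerate pass that accumulates the last index of a word longer than 4 chars, then does one conditional update.
import Mathlib
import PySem

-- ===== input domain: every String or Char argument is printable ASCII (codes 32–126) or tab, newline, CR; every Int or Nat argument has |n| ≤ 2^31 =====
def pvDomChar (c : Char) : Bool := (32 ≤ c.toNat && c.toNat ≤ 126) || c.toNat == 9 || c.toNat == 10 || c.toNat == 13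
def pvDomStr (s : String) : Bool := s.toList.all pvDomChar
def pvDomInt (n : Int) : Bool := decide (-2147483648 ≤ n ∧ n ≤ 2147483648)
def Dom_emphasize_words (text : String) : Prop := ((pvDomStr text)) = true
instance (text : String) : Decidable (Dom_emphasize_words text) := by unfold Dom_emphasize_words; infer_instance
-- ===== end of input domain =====

-- B replaces A's backward early-break scan by one forward pass that remembers the last
-- index of a word longer than 4 characters; alternative decomposition, same cost.

-- ===== PORT A =====
-- A's `for i in range(len(words)-1,-1,-1)` with break: scan indices n-1 … 0, stop at the
-- first word of length > 4, uppercase it in place.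
def emphAScan (words : List String) : Nat → List String
  | 0 => words
  | n + 1 =>
    let w := words.getD n ""
    if 4 < PySem.Str.len w then words.set n (PySem.Str.upper w)
    else emphAScan words n

def emphasize_words (text : String) : String :=
  let words := PySem.Str.split₀ text
  if words.length ≤ 3 then PySem.Str.upper text
  else PySem.Str.join " " (emphAScan words words.length)

-- ===== PORT B =====
-- B's forward pass: `for i, w in enumerate(words): if len(w) > 4: last = i`
def emphBLast (words : List String) : Int :=
  (PySem.List.enumerate words 0).foldl
    (fun last p => if 4 < PySem.Str.len p.2 then p.1 else last) (-1)

def emphasize_words_alt (text : String) : String :=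
  let words := PySem.Str.split₀ text
  if words.length ≤ 3 then PySem.Str.upper text
  else
    let last := emphBLast words
    let words' :=
      if 0 ≤ last then
        words.set last.toNat (PySem.Str.upper (words.getD last.toNat ""))
      else words
    PySem.Str.join " " words'

-- ===== PRECONDITION & SPEC =====
def Spec_emphasize_words (text : String) (out : String) : Prop := out = emphasize_words_alt text
instance (text : String) (out : String) : Decidable (Spec_emphasize_words text out) := by unfold Spec_emphasize_words; infer_instance

-- ===== CLAIM (what is proved, stated in full; the proofs are below) =====
def Claim_equal_emphasize_words : Prop := ∀ (text : String), Dom_emphasize_words text → Spec_emphasize_words text (emphasize_words text)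

-- ===== LEMMAS AND PROOFS =====

-- the forward fold with general start/acc
def bfold (ws : List String) (s a : Int) : Int :=
  (PySem.List.enumerate ws s).foldl
    (fun last p => if 4 < PySem.Str.len p.2 then p.1 else last) a

theorem emphBLast_eq (ws : List String) : emphBLast ws = bfold ws 0 (-1) := rfl

theorem bfold_append_singleton (ws : List String) (w : String) (s a : Int) :
    bfold (ws ++ [w]) s a =
      if 4 < PySem.Str.len w then s + ws.length else bfold ws s a := by
  simp [bfold, PySem.List.enumerate_append, List.foldl_append, PySem.List.enumerate_cons,
    PySem.List.enumerate_nil]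

theorem bfold_bound (ws : List String) (s a : Int) :
    bfold ws s a = a ∨ (s ≤ bfold ws s a ∧ bfold ws s a < s + ws.length) := by
  induction ws generalizing s a with
  | nil => simp [bfold, PySem.List.enumerate_nil]
  | cons w ws ih =>
    have h : bfold (w :: ws) s a
        = bfold ws (s + 1) (if 4 < PySem.Str.len w then s else a) := by
      simp [bfold, PySem.List.enumerate_cons]
    rw [h]
    rcases ih (s + 1) (if 4 < PySem.Str.len w then s else a) with h2 | h2
    · rw [h2]; split_ifs with hw
      · right; constructor <;> simp
      · left; rfl
    · right; simp only [List.length_cons]; push_cast; omega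

theorem emphAScan_append (ws : List String) (w : String) (n : Nat) (hn : n ≤ ws.length) :
    emphAScan (ws ++ [w]) n = emphAScan ws n ++ [w] := by
  induction n with
  | zero => simp [emphAScan]
  | succ n ih =>
    have hlt : n < ws.length := hn
    have hget : (ws ++ [w]).getD n "" = ws.getD n "" := by
      simp [List.getD, List.getElem?_append_left hlt]
    simp only [emphAScan, hget]
    split_ifs with hw
    · rw [List.set_append_left _ _ hlt]
    · exact ih (le_of_lt hlt)

theorem main_lemma (ws : List String) :
    emphAScan ws ws.length =
      (if 0 ≤ emphBLast ws then
        ws.set (emphBLast ws).toNat (PySem.Str.upper (ws.getD (emphBLast ws).toNat ""))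
      else ws) := by
  induction ws using List.reverseRecOn with
  | nil => simp [emphAScan, emphBLast, PySem.List.enumerate_nil]
  | append_singleton ws w ih =>
    have hB : emphBLast (ws ++ [w])
        = if 4 < PySem.Str.len w then (ws.length : Int) else emphBLast ws := by
      rw [emphBLast_eq, bfold_append_singleton, ← emphBLast_eq]; simp
    have hgetw : (ws ++ [w]).getD ws.length "" = w := by
      simp [List.getD]
    have hlen : (ws ++ [w]).length = ws.length + 1 := by simp
    rw [hlen]
    simp only [emphAScan, hgetw]
    by_cases hw : 4 < PySem.Str.len w
    · simp only [hw, if_pos, hB]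
      have : (0:Int) ≤ (ws.length : Int) := by positivity
      rw [if_pos this]
      simp
    · simp only [hw, if_false, hB]
      rw [emphAScan_append ws w ws.length le_rfl, ih]
      rcases bfold_bound ws 0 (-1) with h | h
      · rw [← emphBLast_eq] at h
        rw [h]; norm_num
      · rw [← emphBLast_eq] at h
        obtain ⟨h0, hlt⟩ := h
        rw [if_pos h0, if_pos h0]
        have hn : (emphBLast ws).toNat < ws.length := by omega
        have hget : (ws ++ [w]).getD (emphBLast ws).toNat "" = ws.getD (emphBLast ws).toNat "" := by
          simp [List.getD, List.getElem?_append_left hn]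
        rw [hget, List.set_append_left _ _ hn]

-- ===== VERDICT (by name: the statement is the Claim_ definition above) =====
theorem emphasize_words_spec : Claim_equal_emphasize_words := by
  intro text _
  unfold Spec_emphasize_words emphasize_words emphasize_words_alt
  by_cases h : (PySem.Str.split₀ text).length ≤ 3
  · simp [h]
  · simp only [h, if_false]
    rw [main_lemma]
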